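-- pv_equiv track=rewrite | github.com/gy3117577403-ai/tuzhi | backend/services/flat_cad_generator.py | _cavity_indices
-- ===== SOURCE A (Python) =====
-- def _cavity_indices(rows: int, cols: int, active: int) -> list[tuple[int, int, int]]:
--     """row-major left-to-right top-to-bottom, 1-based labels."""
--     out: list[tuple[int, int, int]] = []
--     n = 0
--     for r in range(rows):
--         for c in range(cols):
--             if n >= active:
--                 return out
--             out.append((r, c, n + 1))
--             n += 1
--     return out
-- ===== SOURCE B (Python) =====
-- def _cavity_indices(rows: int, cols: int, active: int) -> list[tuple[int, int, int]]:
--     """row-major left-to-right top-to-bottom, 1-based labels."""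
--     capacity = max(rows, 0) * max(cols, 0)
--     count = min(active, capacity)
--     return [(i // cols, i % cols, i + 1) for i in range(count)]
-- ===== Notes on version B (the rewrite author's own statement) =====
-- stated objective: alternative
-- what changed: Replaces the two nested row/column loops with early return by a single flat index pass over range(min(active, clamped rows*cols)), recovering (row, col) by divmod.
import Mathlib
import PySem

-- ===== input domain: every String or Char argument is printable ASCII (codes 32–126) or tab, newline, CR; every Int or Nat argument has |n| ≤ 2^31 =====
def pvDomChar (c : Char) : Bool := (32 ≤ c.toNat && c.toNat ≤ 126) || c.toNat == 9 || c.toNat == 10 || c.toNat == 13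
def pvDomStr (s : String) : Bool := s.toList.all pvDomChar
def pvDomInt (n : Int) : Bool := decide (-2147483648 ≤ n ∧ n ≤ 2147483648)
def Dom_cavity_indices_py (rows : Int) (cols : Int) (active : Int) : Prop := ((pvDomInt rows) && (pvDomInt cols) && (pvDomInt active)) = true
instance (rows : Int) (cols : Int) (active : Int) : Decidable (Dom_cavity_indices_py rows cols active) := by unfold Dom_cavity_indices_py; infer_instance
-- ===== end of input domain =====

-- B replaces A's two nested loops (with early return) by one flat index pass over
-- range(min(active, clamped rows*cols)), recovering (row, col) by divmod; objective: alternative.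

-- ===== PORT A =====
-- inner 'for c in range(cols)' loop: returns (out, n, early-return flag)
def pvInnerA (active r : Int) : List Int → List (Int × Int × Int) → Int → List (Int × Int × Int) × Int × Bool
  | [], out, n => (out, n, false)
  | c :: cs, out, n =>
    if active ≤ n then (out, n, true)
    else pvInnerA active r cs (out ++ [(r, c, n + 1)]) (n + 1)

-- outer 'for r in range(rows)' loop
def pvOuterA (cols active : Int) : List Int → List (Int × Int × Int) → Int → List (Int × Int × Int)
  | [], out, _n => out
  | r :: rs, out, n =>
    let res := pvInnerA active r (PySem.List.pyRange 0 cols 1) out n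
    if res.2.2 then res.1 else pvOuterA cols active rs res.1 res.2.1

def cavity_indices_py (rows : Int) (cols : Int) (active : Int) : List (Int × Int × Int) :=
  pvOuterA cols active (PySem.List.pyRange 0 rows 1) [] 0

-- ===== PORT B =====
def cavity_indices_py_alt (rows : Int) (cols : Int) (active : Int) : List (Int × Int × Int) :=
  let capacity := max rows 0 * max cols 0
  let count := min active capacity
  (PySem.List.pyRange 0 count 1).map (fun i => (PySem.Int.floordiv i cols, PySem.Int.mod i cols, i + 1))

-- ===== PRECONDITION & SPEC =====
def Spec_cavity_indices_py (rows : Int) (cols : Int) (active : Int) (out : List (Int × Int × Int)) : Prop := out = cavity_indices_py_alt rows cols active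
instance (rows : Int) (cols : Int) (active : Int) (out : List (Int × Int × Int)) : Decidable (Spec_cavity_indices_py rows cols active out) := by unfold Spec_cavity_indices_py; infer_instance

-- ===== CLAIM (what is proved, stated in full; the proofs are below) =====
def Claim_equal_cavity_indices_py : Prop := ∀ (rows : Int) (cols : Int) (active : Int), Dom_cavity_indices_py rows cols active → Spec_cavity_indices_py rows cols active (cavity_indices_py rows cols active)

-- ===== LEMMAS AND PROOFS =====

-- the triples A appends while walking one row, as a function of start column / count
def pvSeg (r c0 n : Int) (m : Nat) : List (Int × Int × Int) :=
  (List.range m).map (fun j : Nat => (r, c0 + (j : Int), n + 1 + (j : Int)))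

theorem pvSeg_succ (r c0 n : Int) (m : Nat) :
    pvSeg r c0 n (m + 1) = (r, c0, n + 1) :: pvSeg r (c0 + 1) (n + 1) m := by
  unfold pvSeg
  rw [List.range_succ_eq_map, List.map_cons, List.map_map]
  refine congrArg₂ _ (by simp) (List.map_congr_left (fun j _ => ?_))
  simp only [Function.comp]
  push_cast
  refine congrArg₂ _ rfl (congrArg₂ _ (by ring) (by ring))

-- if the column range is empty, the outer loop never changes state
theorem pvOuterA_nilrow (cols active : Int) (h : PySem.List.pyRange 0 cols 1 = [])
    (rs : List Int) (out : List (Int × Int × Int)) (n : Int) :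
    pvOuterA cols active rs out n = out := by
  induction rs generalizing out n with
  | nil => rfl
  | cons r rs ih => simp [pvOuterA, h, pvInnerA, ih]

-- a full row: active not reached inside it
theorem pvInnerA_full (active r cols : Int) (m : Nat) :
    ∀ (c0 n : Int) (out : List (Int × Int × Int)), c0 + m = cols → n + m ≤ active →
    pvInnerA active r (PySem.List.pyRange c0 cols 1) out n =
      (out ++ pvSeg r c0 n m, n + m, false) := by
  induction m with
  | zero =>
    intro c0 n out hc hn
    rw [PySem.List.pyRange_one_eq_nil (by omega)]
    simp [pvInnerA, pvSeg]
  | succ m ih =>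
    intro c0 n out hc hn
    have hlt : c0 < cols := by push_cast at hc; omega
    rw [PySem.List.pyRange_one_cons hlt, pvInnerA, if_neg (by push_cast at hn; omega),
      ih (c0 + 1) (n + 1) _ (by push_cast at hc ⊢; omega) (by push_cast at hn ⊢; omega),
      pvSeg_succ]
    refine congrArg₂ _ (by simp) (congrArg₂ _ (by push_cast; ring) rfl)

-- a partial row: active reached strictly inside it
theorem pvInnerA_partial (active r cols : Int) (m : Nat) :
    ∀ (c0 n : Int) (out : List (Int × Int × Int)), c0 + m = cols → n < active → active < n + m →
    pvInnerA active r (PySem.List.pyRange c0 cols 1) out n =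
      (out ++ pvSeg r c0 n (active - n).toNat, active, true) := by
  induction m with
  | zero => intro c0 n out hc hn ha; push_cast at ha; omega
  | succ m ih =>
    intro c0 n out hc hn ha
    have hlt : c0 < cols := by push_cast at hc; omega
    rw [PySem.List.pyRange_one_cons hlt, pvInnerA, if_neg (by omega)]
    by_cases h1 : n + 1 < active
    · rw [ih (c0 + 1) (n + 1) _ (by push_cast at hc ⊢; omega) h1 (by push_cast at ha ⊢; omega)]
      have hm : (active - n).toNat = (active - (n + 1)).toNat + 1 := by omega
      rw [hm, pvSeg_succ]
      simp
    · -- active = n + 1: the very next check stops the loop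
      have hm1 : 0 < m := by push_cast at ha; omega
      have hlt2 : c0 + 1 < cols := by push_cast at hc; omega
      rw [PySem.List.pyRange_one_cons hlt2, pvInnerA, if_pos (by omega)]
      have h2 : (active - n).toNat = 1 := by omega
      rw [h2]
      have h3 : active = n + 1 := by omega
      simp [pvSeg, h3]

-- a row segment equals the flat divmod map on its index block
theorem pvRowSeg (cols : Int) (hc : 0 < cols) (r0 : Int) (_hr : 0 ≤ r0) (len : Nat)
    (hlen : (len : Int) ≤ cols) :
    pvSeg r0 0 (r0 * cols) len =
      (PySem.List.pyRange (r0 * cols) (r0 * cols + len) 1).map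
        (fun i => (PySem.Int.floordiv i cols, PySem.Int.mod i cols, i + 1)) := by
  rw [PySem.List.pyRange_one]
  have h1 : (r0 * cols + (len : Int) - r0 * cols).toNat = len := by omega
  rw [h1, List.map_map]
  refine List.map_congr_left (fun j hj => ?_)
  simp only [Function.comp, List.mem_range] at *
  have hjlt : (j : Int) < len := by exact_mod_cast hj
  have hdiv : PySem.Int.floordiv (r0 * cols + (j : Int)) cols = r0 := by
    rw [PySem.Int.floordiv_eq_iff_of_pos hc]
    constructor <;> nlinarith
  have hmod : PySem.Int.mod (r0 * cols + (j : Int)) cols = (j : Int) := by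
    have := PySem.Int.floordiv_mul_add_mod (r0 * cols + (j : Int)) cols
    rw [hdiv] at this; omega
  rw [hdiv, hmod]
  exact congrArg₂ _ (by simp) (congrArg₂ _ (by simp) (by ring))

-- main outer-loop invariant (cols > 0)
theorem pvOuterA_run (rows cols active : Int) (hc : 0 < cols) (k : Nat) :
    ∀ (r0 : Int), r0 + k = rows → 0 ≤ r0 → r0 * cols ≤ active →
    pvOuterA cols active (PySem.List.pyRange r0 rows 1)
        ((PySem.List.pyRange 0 (r0 * cols) 1).map
          (fun i => (PySem.Int.floordiv i cols, PySem.Int.mod i cols, i + 1))) (r0 * cols) =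
      (PySem.List.pyRange 0 (min active (rows * cols)) 1).map
        (fun i => (PySem.Int.floordiv i cols, PySem.Int.mod i cols, i + 1)) := by
  induction k with
  | zero =>
    intro r0 hk hr hcap
    have hrr : rows = r0 := by omega
    subst hrr
    rw [PySem.List.pyRange_one_eq_nil le_rfl, pvOuterA]
    have hmin : min active (rows * cols) = rows * cols := by omega
    rw [hmin]
  | succ k ih =>
    intro r0 hk hr hcap
    have hlt : r0 < rows := by push_cast at hk; omega
    rw [PySem.List.pyRange_one_cons hlt, pvOuterA]
    have hcols : ((cols.toNat : Int)) = cols := Int.toNat_of_nonneg hc.le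
    by_cases hstop : active ≤ r0 * cols
    · -- active already reached: first check of the row stops
      have hact : active = r0 * cols := le_antisymm hstop hcap
      have hmin : min active (rows * cols) = r0 * cols := by
        rw [hact]; exact min_eq_left (by nlinarith)
      rw [PySem.List.pyRange_one_cons hc]
      simp only [pvInnerA, if_pos hstop, if_pos]
      rw [hmin]
    · rw [not_le] at hstop
      by_cases hfull : r0 * cols + cols ≤ active
      · -- whole row fits
        rw [pvInnerA_full active r0 cols cols.toNat 0 (r0 * cols) _ (by omega) (by omega)]
        simp only [Bool.false_eq_true, if_false]
        rw [pvRowSeg cols hc r0 hr cols.toNat (by omega),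
          ← List.map_append,
          ← PySem.List.pyRange_one_append 0 (r0 * cols) (r0 * cols + (cols.toNat : Int)) (by nlinarith) (by omega)]
        have h1 : r0 * cols + (cols.toNat : Int) = (r0 + 1) * cols := by rw [hcols]; ring
        rw [h1]
        exact ih (r0 + 1) (by push_cast at hk ⊢; omega) (by omega) (by nlinarith)
      · -- active reached inside this row
        rw [not_le] at hfull
        rw [pvInnerA_partial active r0 cols cols.toNat 0 (r0 * cols) _ (by omega) hstop (by omega)]
        simp only [if_pos]
        have hlen : (((active - r0 * cols).toNat : Int)) ≤ cols := by omega
        rw [pvRowSeg cols hc r0 hr (active - r0 * cols).toNat hlen]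
        have h1 : r0 * cols + (((active - r0 * cols).toNat : Int)) = active := by omega
        rw [h1, ← List.map_append,
          ← PySem.List.pyRange_one_append 0 (r0 * cols) active (by nlinarith) (by omega)]
        have h2 : (r0 + 1) * cols ≤ rows * cols := by nlinarith
        have hmin : min active (rows * cols) = active := min_eq_left (by nlinarith)
        rw [hmin]

-- ===== VERDICT (by name: the statement is the Claim_ definition above) =====
theorem cavity_indices_py_spec : Claim_equal_cavity_indices_py := by
  intro rows cols active _
  simp only [Spec_cavity_indices_py, cavity_indices_py, cavity_indices_py_alt]
  by_cases hc : 0 < cols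
  · by_cases hr : 0 < rows
    · by_cases ha : 0 < active
      · -- main case
        have hrun := pvOuterA_run rows cols active hc rows.toNat 0 (by omega) le_rfl (by omega)
        rw [show (0 : Int) * cols = 0 by ring, PySem.List.pyRange_one_eq_nil le_rfl] at hrun
        simp only [List.map_nil] at hrun
        rw [hrun, show max rows 0 * max cols 0 = rows * cols by
          rw [max_eq_left hr.le, max_eq_left hc.le]]
      · -- active ≤ 0: first check stops immediately
        rw [PySem.List.pyRange_one_cons hr]
        simp only [pvOuterA]
        rw [PySem.List.pyRange_one_cons hc]
        simp only [pvInnerA, if_pos (show active ≤ (0:Int) by omega), if_true]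
        have hmin : min active (max rows 0 * max cols 0) ≤ 0 := by
          have : (0:Int) ≤ max rows 0 * max cols 0 := by positivity
          omega
        rw [PySem.List.pyRange_one_eq_nil hmin, List.map_nil]
    · -- rows ≤ 0
      rw [PySem.List.pyRange_one_eq_nil (show rows ≤ 0 by omega)]
      have hmin : min active (max rows 0 * max cols 0) ≤ 0 := by
        rw [show max rows 0 = 0 by omega]; simp
      rw [PySem.List.pyRange_one_eq_nil hmin]
      rfl
  · -- cols ≤ 0: every row is empty, the loop runs through with no output
    rw [pvOuterA_nilrow cols active (PySem.List.pyRange_one_eq_nil (by omega)) _ _ _]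
    have hmin : min active (max rows 0 * max cols 0) ≤ 0 := by
      rw [show max cols 0 = 0 by omega]; simp
    rw [PySem.List.pyRange_one_eq_nil hmin]
    rfl
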